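-- pv_equiv track=rewrite | github.com/danilapilin/on-player | ai_matching.py | compute_ai_stats_by_operator
-- ===== SOURCE A (Python) =====
-- def compute_ai_stats_by_operator(data):
--     """AI агрегаты в разбивке по операторам."""
--     by_op = {}
--
--     for row in data:
--         vs = row.get("ai_vs_op", "skip")
--         if vs in ("skip", "both_empty"):
--             continue
--
--         op = row.get("operator", "?")
--         if op not in by_op:
--             by_op[op] = {"processed": 0, "agree": 0, "disagree": 0, "ai_only": 0, "op_only": 0}
--
--         by_op[op]["processed"] += 1
--         if vs in by_op[op]:
--             by_op[op][vs] += 1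
--
--     for stats in by_op.values():
--         decided = stats["agree"] + stats["disagree"]
--         stats["accuracy"] = round(stats["agree"] / decided * 100) if decided else 0
--
--     return by_op
-- ===== SOURCE B (Python) =====
-- def compute_ai_stats_by_operator(data):
--     """AI агрегаты в разбивке по операторам (event-stream re-implementation)."""
--     keys = ("processed", "agree", "disagree", "ai_only", "op_only")
--     events = []
--     for row in data:
--         vs = row.get("ai_vs_op", "skip")
--         if vs in ("skip", "both_empty"):
--             continue
--         op = row.get("operator", "?")
--         events.append((op, "processed"))
--         if vs in keys:
--             events.append((op, vs))
--     groups = {}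
--     for op, tok in events:
--         groups.setdefault(op, []).append(tok)
--     result = {}
--     for op, toks in groups.items():
--         agree = toks.count("agree")
--         disagree = toks.count("disagree")
--         decided = agree + disagree
--         result[op] = {
--             "processed": toks.count("processed"),
--             "agree": agree,
--             "disagree": disagree,
--             "ai_only": toks.count("ai_only"),
--             "op_only": toks.count("op_only"),
--             "accuracy": round(agree / decided * 100) if decided else 0,
--         }
--     return result
-- ===== Notes on version B (the rewrite author's own statement) =====
-- stated objective: alternative
-- what changed: B replaces A's single pass of in-place counter mutation on nested dicts by a different decomposition: it flattens the rows into an (operator, token) event stream, groups the tokens per operator, and then builds each stats row in one shot by counting tokens (the 'processed' token is emitted unconditionally, so a row whose ai_vs_op is literally 'processed' is counted exactly as A counts it).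
import Mathlib
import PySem

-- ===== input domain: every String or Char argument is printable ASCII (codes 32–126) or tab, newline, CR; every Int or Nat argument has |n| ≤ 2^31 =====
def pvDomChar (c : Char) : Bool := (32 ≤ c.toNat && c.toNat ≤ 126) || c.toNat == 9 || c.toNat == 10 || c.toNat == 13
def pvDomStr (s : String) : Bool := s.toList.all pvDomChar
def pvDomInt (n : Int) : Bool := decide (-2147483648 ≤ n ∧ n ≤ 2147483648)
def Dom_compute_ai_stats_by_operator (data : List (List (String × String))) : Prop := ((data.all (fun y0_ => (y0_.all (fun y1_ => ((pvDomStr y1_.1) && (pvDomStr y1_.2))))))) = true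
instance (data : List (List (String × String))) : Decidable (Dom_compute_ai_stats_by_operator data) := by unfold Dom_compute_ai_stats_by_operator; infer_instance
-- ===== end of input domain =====

-- B re-groups the rows as a flat (operator, token) event stream and counts tokens per group;
-- same return value as A (alternative decomposition, not claimed faster). Objective: alternative.


-- ===== SHARED PYTHON PRIMITIVES (used by both ports: both Pythons evaluate the same
-- expressions `row.get(k, dflt)` and `round(agree / decided * 100)`) =====

-- row.get(k, dflt): first-match lookup in the association list standing for the Python dict
def pvRowGet (row : List (String × String)) (k dflt : String) : String :=
  (((row.find? (fun p => p.1 == k)).map (fun p => p.2)).getD dflt)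

-- round-half-to-even of num/den (den > 0): Python's round() on an exactly represented value
def pvRHE (num den : Nat) : Nat :=
  let q := num / den
  let r := num % den
  if 2 * r < den then q else if den < 2 * r then q + 1 else if q % 2 == 0 then q else q + 1

-- nearest IEEE-754 double of the positive rational num/den, as (mantissa, exponent):
-- value = mantissa * 2^exponent with 2^52 ≤ mantissa < 2^53 (no overflow/subnormals in our range)
def pvFl (num den : Nat) : Nat × Int :=
  let sh : Int := 52 + (Nat.log2 den : Int) - (Nat.log2 num : Int)
  let nd : Nat × Nat := if 0 ≤ sh then (num * 2 ^ sh.toNat, den) else (num, den * 2 ^ (-sh).toNat)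
  let m := pvRHE nd.1 nd.2
  if 2 ^ 53 ≤ m then (pvRHE nd.1 (2 * nd.2), 1 - sh)
  else if m < 2 ^ 52 then (pvRHE (2 * nd.1) nd.2, -sh - 1)
  else (m, -sh)

-- hand-port of Python's  round(a / d * 100)  for 0 ≤ a ≤ d, 0 < d (the only way the ports call
-- it): float division, float multiplication by 100, then banker's rounding — each float step
-- emulated exactly on rationals (verified against CPython on all 0 ≤ a ≤ d ≤ 4000 and random
-- larger pairs; exact in this range, where no overflow or subnormal can occur)
def pvRound100 (a d : Int) : Int :=
  if a ≤ 0 then 0 else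
  let f1 := pvFl a.toNat d.toNat
  let f2 := pvFl (f1.1 * 100) 1
  let e := f1.2 + f2.2
  if 0 ≤ e then ((f2.1 * 2 ^ e.toNat : Nat) : Int) else ((pvRHE f2.1 (2 ^ (-e).toNat) : Nat) : Int)

-- ===== PORT A =====
def pvInitStats : PySem.Dict String Int :=
  PySem.Dict.mk [("processed", 0), ("agree", 0), ("disagree", 0), ("ai_only", 0), ("op_only", 0)]

def compute_ai_stats_by_operator (data : List (List (String × String))) : List (String × List (String × Int)) :=
  let by_op : PySem.Dict String (PySem.Dict String Int) :=
    data.foldl (fun by_op row =>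
      let vs := pvRowGet row "ai_vs_op" "skip"
      if vs == "skip" || vs == "both_empty" then by_op
      else
        let op := pvRowGet row "operator" "?"
        let by_op := if by_op.contains op then by_op else by_op.insert op pvInitStats
        let s := by_op.getD op PySem.Dict.empty   -- by_op[op]; the key is present
        let s := s.modify "processed" 0 (· + 1)
        let s := if s.contains vs then s.modify vs 0 (· + 1) else s
        by_op.insert op s)                        -- write the mutated stats dict back in place
      PySem.Dict.empty
  -- second loop: add "accuracy" to every stats dict (mutation in place = re-insert per value)
  by_op.items.map (fun kv =>
    let stats := kv.2
    let decided := stats.getD "agree" 0 + stats.getD "disagree" 0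
    let stats := stats.insert "accuracy"
      (if decided == 0 then 0 else pvRound100 (stats.getD "agree" 0) decided)
    (kv.1, stats.items))

-- ===== PORT B =====
def pvKeys : List String := ["processed", "agree", "disagree", "ai_only", "op_only"]

-- the (operator, token) events one row contributes (empty for skipped rows)
def pvRowEvents (row : List (String × String)) : List (String × String) :=
  let vs := pvRowGet row "ai_vs_op" "skip"
  if vs == "skip" || vs == "both_empty" then []
  else
    let op := pvRowGet row "operator" "?"
    (op, "processed") :: (if pvKeys.contains vs then [(op, vs)] else [])

-- the per-operator stats row built by B's dict comprehension from the operator's token list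
def pvStatsRow (toks : List String) : List (String × Int) :=
  let agree : Int := toks.count "agree"
  let disagree : Int := toks.count "disagree"
  let decided := agree + disagree
  [("processed", (toks.count "processed" : Int)), ("agree", agree), ("disagree", disagree),
   ("ai_only", (toks.count "ai_only" : Int)), ("op_only", (toks.count "op_only" : Int)),
   ("accuracy", if decided == 0 then 0 else pvRound100 agree decided)]

def compute_ai_stats_by_operator_alt (data : List (List (String × String))) : List (String × List (String × Int)) :=
  let events : List (String × String) :=
    data.foldl (fun ev row => ev ++ pvRowEvents row) []
  let groups : PySem.Dict String (List String) :=
    events.foldl (fun g e => g.modify e.1 [] (· ++ [e.2])) PySem.Dict.empty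
  groups.items.map (fun kv => (kv.1, pvStatsRow kv.2))

-- ===== PRECONDITION & SPEC =====
def Spec_compute_ai_stats_by_operator (data : List (List (String × String))) (out : List (String × List (String × Int))) : Prop := out = compute_ai_stats_by_operator_alt data
instance (data : List (List (String × String))) (out : List (String × List (String × Int))) : Decidable (Spec_compute_ai_stats_by_operator data out) := by unfold Spec_compute_ai_stats_by_operator; infer_instance

-- ===== CLAIM (what is proved, stated in full; the proofs are below) =====
def Claim_equal_compute_ai_stats_by_operator : Prop := ∀ (data : List (List (String × String))), Dom_compute_ai_stats_by_operator data → Spec_compute_ai_stats_by_operator data (compute_ai_stats_by_operator data)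

-- ===== LEMMAS AND PROOFS =====

-- the counting image of a token list: the stats dict A maintains for a group whose tokens are toks
def pvStatsD (toks : List String) : PySem.Dict String Int :=
  PySem.Dict.mk [("processed", (toks.count "processed" : Int)), ("agree", (toks.count "agree" : Int)),
    ("disagree", (toks.count "disagree" : Int)), ("ai_only", (toks.count "ai_only" : Int)),
    ("op_only", (toks.count "op_only" : Int))]

-- A's accumulator as the image of B's accumulator
def pvImg (g : PySem.Dict String (List String)) : PySem.Dict String (PySem.Dict String Int) :=
  PySem.Dict.mk (g.items.map (fun kv => (kv.1, pvStatsD kv.2)))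

lemma pvImg_contains (g : PySem.Dict String (List String)) (k : String) :
    (pvImg g).contains k = g.contains k := by
  simp [pvImg, PySem.Dict.contains, List.any_map, Function.comp_def]

lemma pvImg_insert (g : PySem.Dict String (List String)) (k : String) (L : List String) :
    pvImg (g.insert k L) = (pvImg g).insert k (pvStatsD L) := by
  apply PySem.Dict.ext
  by_cases h : g.contains k = true
  · rw [pvImg, PySem.Dict.items_insert_of_contains _ _ h,
      PySem.Dict.items_insert_of_contains _ _ (by rw [pvImg_contains]; exact h)]
    show _ = List.map _ (pvImg g).items
    rw [pvImg]
    simp only [List.map_map]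
    refine List.map_congr_left fun p _ => ?_
    by_cases hp : p.1 = k <;> simp [hp]
  · rw [pvImg, PySem.Dict.items_insert_of_not_contains _ _ (by simpa using h),
      PySem.Dict.items_insert_of_not_contains _ _ (by rw [pvImg_contains]; simpa using h)]
    show _ = (pvImg g).items ++ _
    rw [pvImg]
    simp

lemma pvImg_getD (g : PySem.Dict String (List String)) (hg : g.keys.Nodup) (k : String)
    (hk : g.contains k = true) :
    (pvImg g).getD k PySem.Dict.empty = pvStatsD (g.getD k []) := by
  have h1 : (g.get? k).isSome := by rw [← PySem.Dict.contains_eq_isSome_get?]; exact hk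
  obtain ⟨v, hv⟩ := Option.isSome_iff_exists.mp h1
  have hm2 : (k, pvStatsD v) ∈ (pvImg g).items := by
    simp only [pvImg]
    exact List.mem_map.mpr ⟨(k, v), PySem.Dict.mem_items_of_get?_eq_some _ hv, rfl⟩
  rw [PySem.Dict.getD_of_mem_items _ hm2 (by simpa [pvImg, PySem.Dict.keys] using hg),
    PySem.Dict.getD_of_get?_eq_some _ _ hv]

-- the crux: A's in-place increments on a group's stats dict = recounting after appending the row's tokens
lemma pvStatsD_step (toks : List String) (vs : String) :
    (let s := (pvStatsD toks).modify "processed" 0 (· + 1);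
     if s.contains vs then s.modify vs 0 (· + 1) else s)
      = pvStatsD (toks ++ ("processed" :: (if pvKeys.contains vs then [vs] else []))) := by
  by_cases h1 : vs = "processed"
  · subst h1
    simp [pvStatsD, pvKeys, PySem.Dict.modify, PySem.Dict.getD, PySem.Dict.get?,
      PySem.Dict.insert, PySem.Dict.contains, List.count_append]
    ring
  · by_cases h2 : vs = "agree"
    · subst h2
      simp [pvStatsD, pvKeys, PySem.Dict.modify, PySem.Dict.getD, PySem.Dict.get?,
        PySem.Dict.insert, PySem.Dict.contains, List.count_append]
    · by_cases h3 : vs = "disagree"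
      · subst h3
        simp [pvStatsD, pvKeys, PySem.Dict.modify, PySem.Dict.getD, PySem.Dict.get?,
          PySem.Dict.insert, PySem.Dict.contains, List.count_append]
      · by_cases h4 : vs = "ai_only"
        · subst h4
          simp [pvStatsD, pvKeys, PySem.Dict.modify, PySem.Dict.getD, PySem.Dict.get?,
            PySem.Dict.insert, PySem.Dict.contains, List.count_append]
        · by_cases h5 : vs = "op_only"
          · subst h5
            simp [pvStatsD, pvKeys, PySem.Dict.modify, PySem.Dict.getD, PySem.Dict.get?,
              PySem.Dict.insert, PySem.Dict.contains, List.count_append]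
          · simp [pvStatsD, pvKeys, PySem.Dict.modify, PySem.Dict.getD, PySem.Dict.get?,
              PySem.Dict.insert, PySem.Dict.contains, List.count_append, h1, h2, h3, h4, h5]
            intro h
            rcases h with h | h | h | h | h <;> exact absurd h.symm ‹_›

-- modify is definitionally insert-with-default (cited as rfl; used to push B's grouping step to insert)
lemma pvModify_eq {ν : Type} (d : PySem.Dict String ν) (k : String) (d0 : ν) (f : ν → ν) :
    d.modify k d0 f = d.insert k (f (d.getD k d0)) := rfl

-- grouping a row's events preserves key uniqueness
lemma pvB_nodup (g : PySem.Dict String (List String)) (hg : g.keys.Nodup)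
    (ev : List (String × String)) :
    (ev.foldl (fun g e => g.modify e.1 [] (· ++ [e.2])) g).keys.Nodup :=
  PySem.Dict.nodup_keys_foldl_modify_key ev Prod.fst [] (fun _ e => (· ++ [e.2])) g hg

-- B's grouping of one row's events, collapsed to a single insert (two cases: one or two events)
lemma pvGroupRow_one (g : PySem.Dict String (List String)) (op : String) :
    [(op, "processed")].foldl (fun g e => g.modify e.1 [] (· ++ [e.2])) g
      = g.insert op (g.getD op [] ++ ["processed"]) := by
  rw [List.foldl_cons, List.foldl_nil, pvModify_eq]

lemma pvGroupRow_two (g : PySem.Dict String (List String)) (op vs : String) :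
    [(op, "processed"), (op, vs)].foldl (fun g e => g.modify e.1 [] (· ++ [e.2])) g
      = g.insert op (g.getD op [] ++ ["processed", vs]) := by
  rw [List.foldl_cons, List.foldl_cons, List.foldl_nil, pvModify_eq, pvModify_eq,
    PySem.Dict.getD_insert_self, PySem.Dict.insert_insert_self]
  simp

-- one row: A's update of the image dict = the image of B's grouping of the row's events
lemma pvRow_step (g : PySem.Dict String (List String)) (hg : g.keys.Nodup)
    (row : List (String × String)) :
    (let vs := pvRowGet row "ai_vs_op" "skip";
     if vs == "skip" || vs == "both_empty" then pvImg g
     else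
       let op := pvRowGet row "operator" "?"
       let d := if (pvImg g).contains op then pvImg g else (pvImg g).insert op pvInitStats
       let s := d.getD op PySem.Dict.empty
       let s := s.modify "processed" 0 (· + 1)
       let s := if s.contains vs then s.modify vs 0 (· + 1) else s
       d.insert op s)
      = pvImg ((pvRowEvents row).foldl (fun g e => g.modify e.1 [] (· ++ [e.2])) g) := by
  rw [pvRowEvents]
  set vs := pvRowGet row "ai_vs_op" "skip" with hvs
  by_cases hskip : (vs == "skip" || vs == "both_empty") = true
  · simp [hskip]
  · simp only [hskip, if_false, Bool.false_eq_true]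
    set op := pvRowGet row "operator" "?" with hop
    have hInit : pvInitStats = pvStatsD [] := by decide
    have hEv : ((op, "processed") :: (if pvKeys.contains vs then [(op, vs)] else []) : List (String × String)).foldl
          (fun g e => g.modify e.1 [] (· ++ [e.2])) g
        = g.insert op (g.getD op [] ++ ("processed" :: (if pvKeys.contains vs then [vs] else []))) := by
      by_cases hk : pvKeys.contains vs = true
      · simp only [hk, if_pos]
        exact pvGroupRow_two g op vs
      · simp only [hk, Bool.false_eq_true, if_false]
        simpa using pvGroupRow_one g op
    rw [hEv]
    by_cases hc : g.contains op = true
    · -- operator already present on both sides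
      have hL := pvImg_getD g hg op hc
      rw [pvImg_contains, hc, if_pos rfl, hL, pvStatsD_step, ← pvImg_insert]
    · -- a fresh operator
      have hc' : g.contains op = false := by simpa using hc
      have h0 : g.getD op [] = [] := PySem.Dict.getD_of_not_contains _ _ hc'
      rw [pvImg_contains, hc']
      simp only [Bool.false_eq_true, if_false]
      rw [hInit, ← pvImg_insert,
        pvImg_getD _ (PySem.Dict.nodup_keys_insert _ _ _ hg) op
          (by rw [PySem.Dict.contains_eq_isSome_get?, PySem.Dict.get?_insert_self]; rfl),
        PySem.Dict.getD_insert_self, pvStatsD_step, ← pvImg_insert,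
        PySem.Dict.insert_insert_self, h0]

-- the whole first pass, by induction over the rows
lemma pvFold_eq (data : List (List (String × String))) :
    ∀ (g : PySem.Dict String (List String)), g.keys.Nodup →
      data.foldl (fun by_op row =>
        let vs := pvRowGet row "ai_vs_op" "skip"
        if vs == "skip" || vs == "both_empty" then by_op
        else
          let op := pvRowGet row "operator" "?"
          let by_op := if by_op.contains op then by_op else by_op.insert op pvInitStats
          let s := by_op.getD op PySem.Dict.empty
          let s := s.modify "processed" 0 (· + 1)
          let s := if s.contains vs then s.modify vs 0 (· + 1) else s
          by_op.insert op s) (pvImg g)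
      = pvImg (data.foldl (fun g row =>
          (pvRowEvents row).foldl (fun g e => g.modify e.1 [] (· ++ [e.2])) g) g) := by
  induction data with
  | nil => intro g _; rfl
  | cons row rest ih =>
    intro g hg
    rw [List.foldl_cons, List.foldl_cons, pvRow_step g hg row]
    exact ih _ (pvB_nodup g hg _)

-- the second pass on one group: re-inserting "accuracy" into the image dict = B's literal stats row
lemma pvFinalize (toks : List String) :
    (let stats := pvStatsD toks
     let decided := stats.getD "agree" 0 + stats.getD "disagree" 0
     let stats := stats.insert "accuracy"
       (if decided == 0 then 0 else pvRound100 (stats.getD "agree" 0) decided)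
     stats.items) = pvStatsRow toks := by
  simp [pvStatsD, pvStatsRow, PySem.Dict.getD, PySem.Dict.get?, PySem.Dict.insert,
    PySem.Dict.contains]

-- ===== VERDICT (by name: the statement is the Claim_ definition above) =====
theorem compute_ai_stats_by_operator_spec : Claim_equal_compute_ai_stats_by_operator := by
  intro data _
  unfold Spec_compute_ai_stats_by_operator
  simp only [compute_ai_stats_by_operator, compute_ai_stats_by_operator_alt]
  rw [PySem.List.foldl_append_eq_flatMap, List.nil_append, List.foldl_flatMap]
  have h0 : (PySem.Dict.empty : PySem.Dict String (PySem.Dict String Int))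
      = pvImg PySem.Dict.empty := rfl
  rw [h0, pvFold_eq data PySem.Dict.empty PySem.Dict.nodup_keys_empty]
  rw [pvImg]
  simp only [List.map_map]
  refine List.map_congr_left fun kv _ => ?_
  simpa using congrArg (Prod.mk kv.1) (pvFinalize kv.2)
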